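-- pv_equiv track=rewrite | github.com/miliar/Code_Jam_Webscraper | solutions_python/solutions_year16_round0_nr2/3963.py | solve
-- ===== SOURCE A (Python) =====
-- def flip(what):
--     return '-' if what=='+' else '+'
--
-- def solve(l, what):
--     if len(l)==1:
--         return 0 if l[0]==what else 1
--     else:
--         if l[-1]==what:
--             return solve(l[:-1], what)
--         else:
--             return 1 + solve(l[:-1], flip(what))
-- ===== SOURCE B (Python) =====
-- def solve(l, what):
--     # P[i]/M[i]: flips to fix the prefix l[:i] when the required top symbol is '+'/'-'.
--     P, M = [0], [0]
--     for c in l: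
--         p, m = P[-1], M[-1]
--         P.append(p if c == '+' else 1 + m)
--         M.append(m if c == '-' else 1 + p)
--     i = len(l) - 1
--     while i >= 0 and l[i] == what:
--         i -= 1
--     if i < 0:
--         return 0
--     return 1 + (M[i] if what == '+' else P[i])
-- ===== Notes on version B (the rewrite author's own statement) =====
-- stated objective: faster
-- what changed: B replaces A's recursive simulation, which copies l[:-1] and toggles the target string at every step, by a forward dynamic program that tabulates the answer for both '+' and '-' targets over every prefix plus one backward scan for the suffix already matching 'what'; Pre_ excludes only the empty string, on which A raises IndexError.
import Mathlib
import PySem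

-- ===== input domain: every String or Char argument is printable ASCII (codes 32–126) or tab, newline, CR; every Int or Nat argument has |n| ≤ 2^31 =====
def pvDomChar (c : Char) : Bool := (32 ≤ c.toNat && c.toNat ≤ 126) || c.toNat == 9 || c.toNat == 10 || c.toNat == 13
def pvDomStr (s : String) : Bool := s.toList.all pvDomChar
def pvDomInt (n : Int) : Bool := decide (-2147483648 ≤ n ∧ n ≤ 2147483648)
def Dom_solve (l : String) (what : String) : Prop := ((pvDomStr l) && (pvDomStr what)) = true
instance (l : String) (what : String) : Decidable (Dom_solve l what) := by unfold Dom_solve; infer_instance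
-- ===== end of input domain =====

-- B replaces A's O(n^2) recursive simulation (slicing l[:-1] at every step) by a forward
-- dynamic program over both targets plus one backward matching-suffix scan, O(n).

-- ===== PORT A =====
def pyFlip (what : String) : String := if what == "+" then "-" else "+"

-- A's recursion on the code points of l; the [] case is unreachable under Pre_ (Python raises IndexError there)
def solveGo : List Char → String → Int
  | [], _ => 0
  | c :: cs, what =>
    if (c :: cs).length == 1 then
      if String.ofList [PySem.List.pyGetD (c :: cs) 0 ' '] == what then 0 else 1
    else
      if String.ofList [PySem.List.pyGetD (c :: cs) (-1) ' '] == what then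
        solveGo (PySem.List.slice (c :: cs) none (some (-1))) what
      else
        1 + solveGo (PySem.List.slice (c :: cs) none (some (-1))) (pyFlip what)
termination_by cs _ => cs.length
decreasing_by
  all_goals simp [PySem.List.slice_to_neg_one]

def solve (l : String) (what : String) : Int := solveGo l.toList what

-- ===== PORT B =====
-- Source B's 'for c in l' loop: extend the P and M tables (P[-1]/M[-1] are the previous entries)
def bLoop : List Char → List Int → List Int → List Int × List Int
  | [], P, M => (P, M)
  | c :: cs, P, M =>
    let p := PySem.List.pyGetD P (-1) 0
    let m := PySem.List.pyGetD M (-1) 0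
    bLoop cs (P ++ [if c == '+' then p else 1 + m]) (M ++ [if c == '-' then m else 1 + p])

-- Source B's 'while i >= 0 and l[i] == what: i -= 1'
def bSkip (l : List Char) (what : String) (i : Int) : Int :=
  if h : 0 ≤ i ∧ String.ofList [PySem.List.pyGetD l i ' '] == what then bSkip l what (i - 1)
  else i
termination_by (i + 1).toNat
decreasing_by omega

def solve_alt (l : String) (what : String) : Int :=
  let PM := bLoop l.toList [0] [0]
  let i := bSkip l.toList what ((l.toList.length : Int) - 1)
  if i < 0 then 0
  else 1 + (if what == "+" then PySem.List.pyGetD PM.2 i 0 else PySem.List.pyGetD PM.1 i 0)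

-- ===== PRECONDITION & SPEC =====
-- Pre_ excludes only the empty string, on which A raises IndexError (l[-1]).
def Pre_solve (l : String) (what : String) : Prop := l.toList ≠ []
instance (l : String) (what : String) : Decidable (Pre_solve l what) := by
  unfold Pre_solve; infer_instance
def pvWitness_solve : String × String := ("+-+", "+")

def Spec_solve (l : String) (what : String) (out : Int) : Prop := out = solve_alt l what
instance (l : String) (what : String) (out : Int) : Decidable (Spec_solve l what out) := by
  unfold Spec_solve; infer_instance

-- ===== CLAIM =====
def Claim_equal_solve : Prop :=
  ∀ (l : String) (what : String), Dom_solve l what → Pre_solve l what →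
    Spec_solve l what (solve l what)

-- ===== LEMMAS AND PROOFS =====

-- A's scan, rephrased over the reversed character list
def hGo : List Char → String → Int
  | [], _ => 0
  | c :: cs, what =>
    if String.ofList [c] == what then hGo cs what
    else 1 + hGo cs (pyFlip what)

theorem ofList_singleton_inj (a b : Char) : String.ofList [a] = String.ofList [b] ↔ a = b := by
  constructor
  · intro h
    have := congrArg String.toList h
    simpa using this
  · intro h; rw [h]

theorem solveGo_long (cs : List Char) (hlen : cs.length ≠ 1) (hne : cs ≠ []) (w : String) :
    solveGo cs w =
      if String.ofList [PySem.List.pyGetD cs (-1) ' '] == w then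
        solveGo (PySem.List.slice cs none (some (-1))) w
      else
        1 + solveGo (PySem.List.slice cs none (some (-1))) (pyFlip w) := by
  cases cs with
  | nil => exact absurd rfl hne
  | cons c cs =>
    rw [solveGo]
    simp only [beq_iff_eq] at *
    rw [if_neg hlen]

theorem solveGo_eq_hGo (cs : List Char) : ∀ w : String, solveGo cs w = hGo cs.reverse w := by
  induction cs using List.reverseRecOn with
  | nil => intro w; simp [solveGo, hGo]
  | append_singleton ds d ih =>
    intro w
    by_cases hds : ds = []
    · subst hds
      simp only [List.nil_append]
      rw [solveGo.eq_def]
      simp [hGo]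
    · have hlen : (ds ++ [d]).length ≠ 1 := by
        simp only [List.length_append, List.length_cons, List.length_nil]
        have : ds.length ≠ 0 := by simpa using hds
        omega
      rw [solveGo_long (ds ++ [d]) hlen (by simp) w]
      have hget : PySem.List.pyGetD (ds ++ [d]) (-1) ' ' = d :=
        PySem.List.pyGetD_neg_one_append_singleton ds d ' '
      have hslice : PySem.List.slice (ds ++ [d]) none (some (-1)) = ds := by
        rw [PySem.List.slice_to_neg_one]; simp
      have hrev : (ds ++ [d]).reverse = d :: ds.reverse := by simp
      rw [hget, hslice, hrev, hGo, ih, ih]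

-- the intended contents of the two DP tables: entry i is A's answer for the prefix of length i
def pList (xs : List Char) : List Int :=
  (List.range (xs.length + 1)).map (fun i => hGo ((xs.take i).reverse) "+")
def mList (xs : List Char) : List Int :=
  (List.range (xs.length + 1)).map (fun i => hGo ((xs.take i).reverse) "-")

theorem pList_concat (xs : List Char) (c : Char) :
    pList (xs ++ [c]) = pList xs ++ [hGo (c :: xs.reverse) "+"] := by
  unfold pList
  rw [show (xs ++ [c]).length + 1 = (xs.length + 1) + 1 by simp]
  rw [List.range_succ, List.map_append]
  congr 1
  · apply List.map_congr_left
    intro i hi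
    have : i ≤ xs.length := by
      have := List.mem_range.mp hi; omega
    rw [List.take_append_of_le_length this]
  · rw [List.map_singleton, List.take_of_length_le (by simp)]
    simp

theorem mList_concat (xs : List Char) (c : Char) :
    mList (xs ++ [c]) = mList xs ++ [hGo (c :: xs.reverse) "-"] := by
  unfold mList
  rw [show (xs ++ [c]).length + 1 = (xs.length + 1) + 1 by simp]
  rw [List.range_succ, List.map_append]
  congr 1
  · apply List.map_congr_left
    intro i hi
    have : i ≤ xs.length := by
      have := List.mem_range.mp hi; omega
    rw [List.take_append_of_le_length this]
  · rw [List.map_singleton, List.take_of_length_le (by simp)]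
    simp

theorem pList_getLast (xs : List Char) :
    PySem.List.pyGetD (pList xs) (-1) 0 = hGo xs.reverse "+" := by
  unfold pList
  rw [List.range_succ, List.map_append, List.map_singleton]
  rw [PySem.List.pyGetD_neg_one_append_singleton]
  rw [List.take_of_length_le (le_refl _)]
theorem mList_getLast (xs : List Char) :
    PySem.List.pyGetD (mList xs) (-1) 0 = hGo xs.reverse "-" := by
  unfold mList
  rw [List.range_succ, List.map_append, List.map_singleton]
  rw [PySem.List.pyGetD_neg_one_append_singleton]
  rw [List.take_of_length_le (le_refl _)]

theorem pList_get (xs : List Char) (j : Nat) (hj : j ≤ xs.length) :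
    PySem.List.pyGetD (pList xs) (j : Int) 0 = hGo ((xs.take j).reverse) "+" := by
  rw [PySem.List.pyGetD_natCast]
  unfold pList
  rw [List.getD_eq_getElem?_getD, List.getElem?_map, List.getElem?_range (by omega)]
  simp
theorem mList_get (xs : List Char) (j : Nat) (hj : j ≤ xs.length) :
    PySem.List.pyGetD (mList xs) (j : Int) 0 = hGo ((xs.take j).reverse) "-" := by
  rw [PySem.List.pyGetD_natCast]
  unfold mList
  rw [List.getD_eq_getElem?_getD, List.getElem?_map, List.getElem?_range (by omega)]
  simp

-- character/string bridges
theorem ofList_eq_plus (c : Char) : (String.ofList [c] == "+") = (c == '+') := by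
  by_cases h : c = '+'
  · subst h; decide
  · have h1 : String.ofList [c] ≠ "+" := by
      intro hc
      exact h ((ofList_singleton_inj c '+').mp hc)
    simp [h1, h]
theorem ofList_eq_minus (c : Char) : (String.ofList [c] == "-") = (c == '-') := by
  by_cases h : c = '-'
  · subst h; decide
  · have h1 : String.ofList [c] ≠ "-" := by
      intro hc
      exact h ((ofList_singleton_inj c '-').mp hc)
    simp [h1, h]

theorem hGo_cons_plus (c : Char) (r : List Char) :
    hGo (c :: r) "+" = if c == '+' then hGo r "+" else 1 + hGo r "-" := by
  rw [hGo, ofList_eq_plus]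
  rcases Bool.eq_false_or_eq_true (c == '+') with h | h <;> rw [h] <;> simp [pyFlip]
theorem hGo_cons_minus (c : Char) (r : List Char) :
    hGo (c :: r) "-" = if c == '-' then hGo r "-" else 1 + hGo r "+" := by
  rw [hGo, ofList_eq_minus]
  rcases Bool.eq_false_or_eq_true (c == '-') with h | h <;> rw [h] <;> simp [pyFlip]

theorem bLoop_append (cs es : List Char) : ∀ P M : List Int,
    bLoop (cs ++ es) P M = bLoop es (bLoop cs P M).1 (bLoop cs P M).2 := by
  induction cs with
  | nil => intro P M; simp [bLoop]
  | cons c cs ih =>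
    intro P M
    rw [List.cons_append, bLoop, bLoop]
    exact ih _ _

theorem bLoop_inv (xs : List Char) : bLoop xs [0] [0] = (pList xs, mList xs) := by
  induction xs using List.reverseRecOn with
  | nil =>
    rw [bLoop]
    unfold pList mList
    simp [hGo]
  | append_singleton ds d ih =>
    rw [bLoop_append, ih]
    simp only
    simp only [bLoop]
    rw [pList_getLast, mList_getLast, pList_concat, mList_concat,
        hGo_cons_plus, hGo_cons_minus]

theorem bSkip_neg (l : List Char) (what : String) (i : Int) (h : i < 0) :
    bSkip l what i = i := by
  rw [bSkip]
  rw [dif_neg (by omega)]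

theorem bSkip_le (l : List Char) (what : String) (i : Int) : bSkip l what i ≤ i := by
  induction hn : (i + 1).toNat using Nat.strong_induction_on generalizing i with
  | _ n ih =>
    rw [bSkip]
    split_ifs with h
    · have := ih ((i - 1) + 1).toNat (by omega) (i - 1) rfl
      omega
    · omega

theorem bSkip_stable (u : List Char) (d : Char) (what : String) :
    ∀ i : Int, i < (u.length : Int) → bSkip (u ++ [d]) what i = bSkip u what i := by
  intro i
  induction hn : (i + 1).toNat using Nat.strong_induction_on generalizing i with
  | _ n ih =>
    intro hi
    by_cases hneg : i < 0
    · rw [bSkip_neg _ _ _ hneg, bSkip_neg _ _ _ hneg]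
    · have h0 : 0 ≤ i := by omega
      have hget : PySem.List.pyGetD (u ++ [d]) i ' ' = PySem.List.pyGetD u i ' ' := by
        have hi' : i = ((i.toNat : Nat) : Int) := by omega
        rw [hi', PySem.List.pyGetD_natCast, PySem.List.pyGetD_natCast]
        rw [List.getD_eq_getElem?_getD, List.getD_eq_getElem?_getD]
        rw [List.getElem?_append_left (by omega)]
      rw [bSkip]
      conv_rhs => rw [bSkip]
      rw [hget]
      split_ifs with h
      · exact ih ((i - 1) + 1).toNat (by omega) (i - 1) rfl (by omega)
      · rfl

-- B's whole body, expressed on the character list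
def altList (xs : List Char) (what : String) : Int :=
  let PM := bLoop xs [0] [0]
  let i := bSkip xs what ((xs.length : Int) - 1)
  if i < 0 then 0
  else 1 + (if what == "+" then PySem.List.pyGetD PM.2 i 0 else PySem.List.pyGetD PM.1 i 0)

theorem pyGetD_append_length (u : List Char) (d : Char) :
    PySem.List.pyGetD (u ++ [d]) ((u.length : Nat) : Int) ' ' = d := by
  rw [PySem.List.pyGetD_natCast, List.getD_eq_getElem?_getD]
  rw [List.getElem?_append_right (by omega)]
  simp

theorem hGo_eq_altList (r : List Char) : ∀ what : String, r ≠ [] →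
    hGo r what = altList r.reverse what := by
  induction r with
  | nil => intro what h; exact absurd rfl h
  | cons c t ih =>
    intro what _
    have hrev : (c :: t).reverse = t.reverse ++ [c] := by simp
    have hlen : (c :: t).reverse.length = t.length + 1 := by simp
    rw [hGo, hrev]
    by_cases hm : String.ofList [c] == what
    · -- last character matches: both sides reduce to the shorter problem
      rw [if_pos hm]
      have hskip1 : bSkip (t.reverse ++ [c]) what (((t.reverse ++ [c]).length : Int) - 1)
          = bSkip t.reverse what ((t.reverse.length : Int) - 1) := by
        have h1 : ((t.reverse ++ [c]).length : Int) - 1 = ((t.reverse.length : Nat) : Int) := by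
          simp
        rw [h1, bSkip]
        rw [dif_pos ⟨by omega, by rw [pyGetD_append_length]; exact hm⟩]
        rw [bSkip_stable t.reverse c what _ (by omega)]
      by_cases htne : t = []
      · subst htne
        rw [altList, hskip1]
        simp only [List.reverse_nil, List.length_nil]
        rw [bSkip_neg _ _ _ (by omega)]
        rw [if_pos (by omega), hGo]
      · rw [ih what htne]
        rw [altList, altList, hskip1]
        set j := bSkip t.reverse what ((t.reverse.length : Int) - 1) with hj
        have hjle : j ≤ (t.reverse.length : Int) - 1 := bSkip_le _ _ _
        by_cases hj0 : j < 0
        · rw [if_pos hj0, if_pos hj0]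
        · rw [if_neg hj0, if_neg hj0]
          have hjn : j = ((j.toNat : Nat) : Int) := by omega
          have hjlt : j.toNat ≤ t.length := by
            have h2 : (t.reverse.length : Int) = (t.length : Int) := by simp
            omega
          rw [bLoop_inv, bLoop_inv]
          simp only
          rw [pList_concat, mList_concat]
          have hP : PySem.List.pyGetD (pList t.reverse ++ [hGo (c :: (t.reverse).reverse) "+"]) j 0
              = PySem.List.pyGetD (pList t.reverse) j 0 := by
            rw [hjn, PySem.List.pyGetD_natCast, PySem.List.pyGetD_natCast]
            rw [List.getD_eq_getElem?_getD, List.getD_eq_getElem?_getD]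
            rw [List.getElem?_append_left (by simp [pList]; omega)]
          have hM : PySem.List.pyGetD (mList t.reverse ++ [hGo (c :: (t.reverse).reverse) "-"]) j 0
              = PySem.List.pyGetD (mList t.reverse) j 0 := by
            rw [hjn, PySem.List.pyGetD_natCast, PySem.List.pyGetD_natCast]
            rw [List.getD_eq_getElem?_getD, List.getD_eq_getElem?_getD]
            rw [List.getElem?_append_left (by simp [mList]; omega)]
          rw [hP, hM]
    · -- last character mismatches: one flip plus the DP value for the rest
      rw [if_neg (by simpa using hm)]
      rw [altList]
      have h1 : ((t.reverse ++ [c]).length : Int) - 1 = ((t.reverse.length : Nat) : Int) := by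
        simp
      rw [h1, bSkip]
      rw [dif_neg (by
        intro hcon
        exact (by simpa using hm : ¬ (String.ofList [c] == what) = true)
          (by rw [← pyGetD_append_length t.reverse c]; exact hcon.2))]
      rw [if_neg (by omega)]
      rw [bLoop_inv]
      simp only
      rw [pList_concat, mList_concat]
      have hP : PySem.List.pyGetD (pList t.reverse ++ [hGo (c :: (t.reverse).reverse) "+"])
          ((t.reverse.length : Nat) : Int) 0 = hGo t "+" := by
        rw [PySem.List.pyGetD_natCast, List.getD_eq_getElem?_getD]
        rw [List.getElem?_append_left (by simp [pList])]
        have := pList_get t.reverse t.reverse.length (le_refl _)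
        rw [PySem.List.pyGetD_natCast, List.getD_eq_getElem?_getD] at this
        rw [this, List.take_of_length_le (by simp), List.reverse_reverse]
      have hM : PySem.List.pyGetD (mList t.reverse ++ [hGo (c :: (t.reverse).reverse) "-"])
          ((t.reverse.length : Nat) : Int) 0 = hGo t "-" := by
        rw [PySem.List.pyGetD_natCast, List.getD_eq_getElem?_getD]
        rw [List.getElem?_append_left (by simp [mList])]
        have := mList_get t.reverse t.reverse.length (le_refl _)
        rw [PySem.List.pyGetD_natCast, List.getD_eq_getElem?_getD] at this
        rw [this, List.take_of_length_le (by simp), List.reverse_reverse]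
      rw [hP, hM]
      unfold pyFlip
      rcases Bool.eq_false_or_eq_true (what == "+") with h | h <;> rw [h] <;> simp

-- ===== VERDICT =====
theorem solve_spec : Claim_equal_solve := by
  intro l what _ hpre
  unfold Spec_solve solve solve_alt
  rw [solveGo_eq_hGo]
  unfold Pre_solve at hpre
  have hne : l.toList.reverse ≠ [] := by
    intro h
    exact hpre (by simpa using congrArg List.reverse h)
  rw [hGo_eq_altList l.toList.reverse what hne]
  rw [altList]
  simp
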